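-- pv_equiv track=rewrite | github.com/mole828/leetcode | problems/2411.smallest-subarrays-with-maximum-bitwise-or.py | smallestSubarrays
-- ===== SOURCE A (Python) =====
-- from typing import List
--
-- def smallestSubarrays(nums: List[int]) -> List[int]:
--     ans = [1] * len(nums)
--     for i,x in enumerate(nums):
--         for j in range(i-1,-1,-1):
--             if nums[j] | x == nums[j]:
--                 break
--             nums[j] |= x
--             ans[j] = i - j + 1
--     return ans
-- ===== SOURCE B (Python) =====
-- from typing import List
--
-- def smallestSubarrays(nums: List[int]) -> List[int]:
--     n = len(nums)
--     ans = [0] * n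
--     ors = []  # distinct values of OR(nums[j..k]) as k grows, each with the smallest k achieving it
--     for j in range(n - 1, -1, -1):
--         new = [(nums[j], j)]
--         for v, k in ors:
--             w = new[-1][0] | v
--             if w != new[-1][0]:
--                 new.append((w, k))
--         ors = new
--         ans[j] = ors[-1][1] - j + 1
--     return ans
-- ===== Notes on version B (the rewrite author's own statement) =====
-- stated objective: alternative
-- what changed: A repeatedly ORs each new element into all earlier positions in place (mutating the caller's list, scanning backward with a break); B walks right-to-left maintaining the stack of distinct suffix-OR values with their first-occurrence indices and reads each answer off the stack's last entry, leaving the input untouched.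
import Mathlib
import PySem

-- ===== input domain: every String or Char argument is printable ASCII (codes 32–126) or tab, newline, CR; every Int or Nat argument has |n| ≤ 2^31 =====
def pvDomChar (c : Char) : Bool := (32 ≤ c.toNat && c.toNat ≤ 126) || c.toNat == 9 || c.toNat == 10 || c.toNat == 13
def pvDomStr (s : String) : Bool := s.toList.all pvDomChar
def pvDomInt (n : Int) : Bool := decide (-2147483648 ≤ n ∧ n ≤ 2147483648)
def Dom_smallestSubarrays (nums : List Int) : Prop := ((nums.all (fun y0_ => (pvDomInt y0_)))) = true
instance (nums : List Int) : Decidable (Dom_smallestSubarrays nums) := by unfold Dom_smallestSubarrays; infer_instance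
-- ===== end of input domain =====

-- B replaces A's in-place backward updating (A mutates the caller's list; the equivalence proved here is about
-- the return value only) by the right-to-left stack of distinct suffix-OR values with first-occurrence indices.

-- ===== PORT A =====
-- inner loop 'for j in range(i-1,-1,-1): …' with break; the Nat argument is j+1 (0 = loop finished)
def pvInnerA (x : Int) (i : Nat) : Nat → List Int × List Int → List Int × List Int
  | 0, st => st
  | j + 1, (ns, ans) =>
    if PySem.Int.bor (ns.getD j 0) x == ns.getD j 0 then (ns, ans)
    else pvInnerA x i j
      (ns.set j (PySem.Int.bor (ns.getD j 0) x), ans.set j ((i : Int) - (j : Int) + 1))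

-- 'for i,x in enumerate(nums)': x is read from the CURRENT (mutated) list at index i — but the inner loop
-- only writes indices < i, so reading st.1 at i is exactly Python's enumerate here.
def smallestSubarrays (nums : List Int) : List Int :=
  ((List.range nums.length).foldl
    (fun st i => pvInnerA (st.1.getD i 0) i i st)
    (nums, List.replicate nums.length 1)).2

-- ===== PORT B =====
-- inner loop 'for v, k in ors: w = new[-1][0] | v; if w != new[-1][0]: new.append((w, k))'
def pvGrow (acc : List (Int × Int)) : List (Int × Int) → List (Int × Int)
  | [] => acc
  | (v, k) :: t =>
    if PySem.Int.bor (acc.getLastD (0, 0)).1 v ≠ (acc.getLastD (0, 0)).1 then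
      pvGrow (acc ++ [(PySem.Int.bor (acc.getLastD (0, 0)).1 v, k)]) t
    else pvGrow acc t

-- outer loop 'for j in range(n - 1, -1, -1)'; the Nat argument is j+1 (0 = loop finished)
def pvLoopB (nums : List Int) : Nat → List (Int × Int) × List Int → List (Int × Int) × List Int
  | 0, st => st
  | j + 1, (ors, ans) =>
    pvLoopB nums j (pvGrow [(nums.getD j 0, (j : Int))] ors,
      ans.set j (((pvGrow [(nums.getD j 0, (j : Int))] ors).getLastD (0, 0)).2 - (j : Int) + 1))

def smallestSubarrays_alt (nums : List Int) : List Int :=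
  (pvLoopB nums nums.length ([], List.replicate nums.length 0)).2

-- ===== PRECONDITION & SPEC =====
def Spec_smallestSubarrays (nums : List Int) (out : List Int) : Prop := out = smallestSubarrays_alt nums
instance (nums : List Int) (out : List Int) : Decidable (Spec_smallestSubarrays nums out) := by unfold Spec_smallestSubarrays; infer_instance

-- ===== CLAIM (what is proved, stated in full; the proofs are below) =====
def Claim_equal_smallestSubarrays : Prop := ∀ (nums : List Int), Dom_smallestSubarrays nums → Spec_smallestSubarrays nums (smallestSubarrays nums)

-- ===== LEMMAS AND PROOFS =====

-- ---- bit-level foundation: PySem.Int.bor is an idempotent commutative associative monoid op ----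

def pvTb (a : Int) (k : Nat) : Bool :=
  if 0 ≤ a then a.toNat.testBit k else !((-a - 1).toNat.testBit k)

theorem pvMod_two_and (m n : Nat) : (m &&& n) % 2 = m % 2 &&& n % 2 := by
  have h0 := Nat.testBit_and m n 0
  simp [Nat.testBit] at h0
  rcases Nat.mod_two_eq_zero_or_one m with h|h <;> rcases Nat.mod_two_eq_zero_or_one n with h'|h' <;>
    rcases Nat.mod_two_eq_zero_or_one (m &&& n) with h''|h'' <;> simp_all

theorem pvMod_two_xor (m n : Nat) : (m ^^^ n) % 2 = m % 2 ^^^ n % 2 := by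
  have h0 := Nat.testBit_xor m n 0
  simp [Nat.testBit] at h0
  rcases Nat.mod_two_eq_zero_or_one m with h|h <;> rcases Nat.mod_two_eq_zero_or_one n with h'|h' <;>
    rcases Nat.mod_two_eq_zero_or_one (m ^^^ n) with h''|h'' <;> simp_all

theorem pvSub_and (M A : Nat) : M - (M &&& A) = M ^^^ (M &&& A) := by
  induction M using Nat.strong_induction_on generalizing A with
  | _ M ih =>
    rcases Nat.eq_zero_or_pos M with h0 | h0
    · subst h0; simp
    have ih2 := ih (M / 2) (Nat.div_lt_self h0 (by norm_num)) (A / 2)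
    have hdiv : (M &&& A) / 2 = M / 2 &&& A / 2 := Nat.and_div_two
    have hxdiv : (M ^^^ (M &&& A)) / 2 = M / 2 ^^^ (M &&& A) / 2 := Nat.xor_div_two
    have hmod : (M &&& A) % 2 = M % 2 &&& A % 2 := pvMod_two_and M A
    have hxmod : (M ^^^ (M &&& A)) % 2 = M % 2 ^^^ (M &&& A) % 2 := pvMod_two_xor M (M &&& A)
    have hle : M / 2 &&& A / 2 ≤ M / 2 := Nat.and_le_left
    have hlem : M % 2 &&& A % 2 ≤ M % 2 := by
      rcases Nat.mod_two_eq_zero_or_one M with h|h <;> rcases Nat.mod_two_eq_zero_or_one A with h'|h' <;>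
        simp [h, h']
    have hmix : M % 2 ^^^ (M % 2 &&& A % 2) = M % 2 - (M % 2 &&& A % 2) := by
      rcases Nat.mod_two_eq_zero_or_one M with h|h <;> rcases Nat.mod_two_eq_zero_or_one A with h'|h' <;>
        simp [h, h']
    rw [hdiv] at hxdiv
    rw [hmod] at hxmod
    rw [hmix] at hxmod
    omega

theorem pvNatD_testBit (M A k : Nat) :
    (M - (M &&& A)).testBit k = (M.testBit k && !(A.testBit k)) := by
  rw [pvSub_and]
  simp [Nat.testBit_xor, Nat.testBit_and]
  cases M.testBit k <;> cases A.testBit k <;> simp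

theorem pvTb_bor (a b : Int) (k : Nat) : pvTb (PySem.Int.bor a b) k = (pvTb a k || pvTb b k) := by
  unfold pvTb PySem.Int.bor
  rcases le_or_gt 0 a with ha | ha <;> rcases le_or_gt 0 b with hb | hb
  · simp [ha, hb, Nat.testBit_or]
  · have hb' : ¬ (0 ≤ b) := by omega
    have h1 : ¬ (0 ≤ -(((-b - 1).toNat - ((-b - 1).toNat &&& a.toNat) : Nat) : Int) - 1) := by omega
    simp only [ha, hb', if_true, if_false, h1]
    have h2 : (-(-(((-b - 1).toNat - ((-b - 1).toNat &&& a.toNat) : Nat) : Int) - 1) - 1).toNat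
        = (-b - 1).toNat - ((-b - 1).toNat &&& a.toNat) := by omega
    rw [h2, pvNatD_testBit]
    cases a.toNat.testBit k <;> cases (-b-1).toNat.testBit k <;> simp
  · have ha' : ¬ (0 ≤ a) := by omega
    have h1 : ¬ (0 ≤ -(((-a - 1).toNat - ((-a - 1).toNat &&& b.toNat) : Nat) : Int) - 1) := by omega
    simp only [ha', hb, if_true, if_false, h1]
    have h2 : (-(-(((-a - 1).toNat - ((-a - 1).toNat &&& b.toNat) : Nat) : Int) - 1) - 1).toNat
        = (-a - 1).toNat - ((-a - 1).toNat &&& b.toNat) := by omega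
    rw [h2, pvNatD_testBit]
    cases b.toNat.testBit k <;> cases (-a-1).toNat.testBit k <;> simp
  · have ha' : ¬ (0 ≤ a) := by omega
    have hb' : ¬ (0 ≤ b) := by omega
    have h1 : ¬ (0 ≤ -((((-a - 1).toNat &&& (-b - 1).toNat : Nat)) : Int) - 1) := by omega
    simp only [ha', hb', if_false, h1]
    have h2 : (-(-((((-a - 1).toNat &&& (-b - 1).toNat : Nat)) : Int) - 1) - 1).toNat
        = (-a - 1).toNat &&& (-b - 1).toNat := by omega
    rw [h2, Nat.testBit_and]
    cases (-a-1).toNat.testBit k <;> cases (-b-1).toNat.testBit k <;> simp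

theorem pvTb_ext (a b : Int) (h : ∀ k, pvTb a k = pvTb b k) : a = b := by
  unfold pvTb at h
  rcases le_or_gt 0 a with ha | ha <;> rcases le_or_gt 0 b with hb | hb
  · have := Nat.eq_of_testBit_eq (by intro k; have := h k; simpa [ha, hb] using this)
    omega
  · exfalso
    have hb' : ¬ (0 ≤ b) := by omega
    have hk := h (a.toNat + (-b - 1).toNat + 1)
    have h1 : a.toNat.testBit (a.toNat + (-b - 1).toNat + 1) = false :=
      Nat.testBit_lt_two_pow (lt_of_lt_of_le Nat.lt_two_pow_self (Nat.pow_le_pow_right (by norm_num) (by omega)))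
    have h2 : (-b - 1).toNat.testBit (a.toNat + (-b - 1).toNat + 1) = false :=
      Nat.testBit_lt_two_pow (lt_of_lt_of_le Nat.lt_two_pow_self (Nat.pow_le_pow_right (by norm_num) (by omega)))
    rw [if_pos ha, if_neg hb'] at hk; rw [h1, h2] at hk; simp at hk
  · exfalso
    have ha' : ¬ (0 ≤ a) := by omega
    have hk := h (b.toNat + (-a - 1).toNat + 1)
    have h1 : b.toNat.testBit (b.toNat + (-a - 1).toNat + 1) = false :=
      Nat.testBit_lt_two_pow (lt_of_lt_of_le Nat.lt_two_pow_self (Nat.pow_le_pow_right (by norm_num) (by omega)))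
    have h2 : (-a - 1).toNat.testBit (b.toNat + (-a - 1).toNat + 1) = false :=
      Nat.testBit_lt_two_pow (lt_of_lt_of_le Nat.lt_two_pow_self (Nat.pow_le_pow_right (by norm_num) (by omega)))
    rw [if_neg ha', if_pos hb] at hk; rw [h1, h2] at hk; simp at hk
  · have ha' : ¬ (0 ≤ a) := by omega
    have hb' : ¬ (0 ≤ b) := by omega
    have := Nat.eq_of_testBit_eq (x := (-a - 1).toNat) (y := (-b - 1).toNat)
      (by intro k
          have hk := h k
          rw [if_neg ha', if_neg hb'] at hk
          exact Bool.not_inj hk)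
    omega

theorem pvBor_self (a : Int) : PySem.Int.bor a a = a :=
  pvTb_ext _ _ (by intro k; rw [pvTb_bor]; cases pvTb a k <;> simp)

theorem pvBor_assoc (a b c : Int) :
    PySem.Int.bor (PySem.Int.bor a b) c = PySem.Int.bor a (PySem.Int.bor b c) :=
  pvTb_ext _ _ (by intro k; simp only [pvTb_bor, Bool.or_assoc])

theorem pvZero_bor (a : Int) : PySem.Int.bor 0 a = a := by
  rw [PySem.Int.bor_comm, PySem.Int.bor_zero]

-- ---- the common functional specification ----

-- OR of nums[j..i-1] (0 for an empty range)
def pvOrF (nums : List Int) (j i : Nat) : Int :=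
  (List.range' j (i - j)).foldl (fun a k => PySem.Int.bor a (nums.getD k 0)) 0

-- answer for start j after the first i elements have been seen
def pvAnsV (nums : List Int) (j : Nat) : Nat → Int
  | 0 => 1
  | i + 1 =>
    if i ≤ j then 1
    else if pvOrF nums j (i + 1) ≠ pvOrF nums j i then (i : Int) - (j : Int) + 1
    else pvAnsV nums j i

theorem pvFoldl_bor_init (nums : List Int) (l : List Nat) (a : Int) :
    l.foldl (fun a k => PySem.Int.bor a (nums.getD k 0)) a
      = PySem.Int.bor a (l.foldl (fun a k => PySem.Int.bor a (nums.getD k 0)) 0) := by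
  induction l generalizing a with
  | nil => simp [PySem.Int.bor_zero]
  | cons h t ih =>
    simp only [List.foldl_cons]
    rw [ih (PySem.Int.bor a (nums.getD h 0)), ih (PySem.Int.bor 0 (nums.getD h 0)),
      pvZero_bor, pvBor_assoc]

theorem pvOrF_succ (nums : List Int) (j i : Nat) (h : j ≤ i) :
    pvOrF nums j (i + 1) = PySem.Int.bor (pvOrF nums j i) (nums.getD i 0) := by
  unfold pvOrF
  have h1 : i + 1 - j = (i - j) + 1 := by omega
  have h2 : j + 1 * (i - j) = i := by omega
  rw [h1, List.range'_concat, List.foldl_append, h2]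
  simp

theorem pvOrF_split (nums : List Int) (j' j i : Nat) (h1 : j' ≤ j) (h2 : j ≤ i) :
    pvOrF nums j' i = PySem.Int.bor (pvOrF nums j' j) (pvOrF nums j i) := by
  unfold pvOrF
  have h3 : List.range' j' (j - j') ++ List.range' (j' + 1 * (j - j')) (i - j) = List.range' j' ((j - j') + (i - j)) :=
    List.range'_append
  have h4 : j' + 1 * (j - j') = j := by omega
  have h5 : (j - j') + (i - j) = i - j' := by omega
  rw [h4, h5] at h3
  rw [← h3, List.foldl_append, pvFoldl_bor_init nums (List.range' j (i - j))]

theorem pvOrF_mono (nums : List Int) (j' j i : Nat) (h1 : j' ≤ j) (h2 : j ≤ i)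
    (h : pvOrF nums j (i + 1) = pvOrF nums j i) :
    pvOrF nums j' (i + 1) = pvOrF nums j' i := by
  have hx : PySem.Int.bor (pvOrF nums j i) (nums.getD i 0) = pvOrF nums j i := by
    rw [← pvOrF_succ nums j i h2]; exact h
  rw [pvOrF_succ nums j' i (le_trans h1 h2), pvOrF_split nums j' j i h1 h2,
    pvBor_assoc, hx, ← pvOrF_split nums j' j i h1 h2]

theorem pvAnsV_le (nums : List Int) (j i : Nat) (h : i ≤ j + 1) : pvAnsV nums j i = 1 := by
  cases i with
  | zero => rfl
  | succ i => unfold pvAnsV; rw [if_pos (by omega)]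

theorem pvAnsV_succ (nums : List Int) (j i : Nat) (h : ¬ i ≤ j) :
    pvAnsV nums j (i + 1)
      = if pvOrF nums j (i + 1) ≠ pvOrF nums j i then (i : Int) - (j : Int) + 1
        else pvAnsV nums j i := by
  conv_lhs => unfold pvAnsV
  rw [if_neg h]

-- ---- getD / set bookkeeping ----

theorem pvGetD_set_self (l : List Int) (j : Nat) (a : Int) (h : j < l.length) :
    (l.set j a).getD j 0 = a := by
  simp [List.getD, h]

theorem pvGetD_set_ne (l : List Int) (j j' : Nat) (a : Int) (h : j ≠ j') :
    (l.set j a).getD j' 0 = l.getD j' 0 := by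
  simp [List.getD, List.getElem?_set_ne h]

theorem pvOrF_self (nums : List Int) (m : Nat) : pvOrF nums m (m + 1) = nums.getD m 0 := by
  rw [pvOrF_succ nums m m (le_refl m)]
  have h0 : pvOrF nums m m = 0 := by unfold pvOrF; simp
  rw [h0, pvZero_bor]

theorem pvGetD_replicate (L j : Nat) (h : j < L) : (List.replicate L (1 : Int)).getD j 0 = 1 := by
  simp [List.getD, h]

-- ---- A's inner loop computes orF/ansV at i+1 below jp1 and is the identity from jp1 up ----

theorem pvInnerA_spec (orig : List Int) (i : Nat) (hi : i < orig.length) :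
    ∀ (jp1 : Nat) (ns ans : List Int), jp1 ≤ i →
    ns.length = orig.length → ans.length = orig.length →
    (∀ j, j < jp1 → ns.getD j 0 = pvOrF orig j i ∧ ans.getD j 0 = pvAnsV orig j i) →
    (pvInnerA (orig.getD i 0) i jp1 (ns, ans)).1.length = orig.length ∧
    (pvInnerA (orig.getD i 0) i jp1 (ns, ans)).2.length = orig.length ∧
    (∀ j, j < jp1 →
      (pvInnerA (orig.getD i 0) i jp1 (ns, ans)).1.getD j 0 = pvOrF orig j (i + 1) ∧
      (pvInnerA (orig.getD i 0) i jp1 (ns, ans)).2.getD j 0 = pvAnsV orig j (i + 1)) ∧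
    (∀ j, jp1 ≤ j →
      (pvInnerA (orig.getD i 0) i jp1 (ns, ans)).1.getD j 0 = ns.getD j 0 ∧
      (pvInnerA (orig.getD i 0) i jp1 (ns, ans)).2.getD j 0 = ans.getD j 0) := by
  intro jp1
  induction jp1 with
  | zero =>
    intro ns ans _ hns hans _
    exact ⟨hns, hans, fun j hj => absurd hj (by omega), fun j _ => ⟨rfl, rfl⟩⟩
  | succ j ih =>
    intro ns ans hle hns hans hinv
    have hji : j < i := by omega
    have hnj : ns.getD j 0 = pvOrF orig j i := (hinv j (by omega)).1
    have hcond : (PySem.Int.bor (ns.getD j 0) (orig.getD i 0) == ns.getD j 0) =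
        decide (pvOrF orig j (i + 1) = pvOrF orig j i) := by
      rw [hnj, ← pvOrF_succ orig j i (by omega)]
      by_cases h : pvOrF orig j (i + 1) = pvOrF orig j i <;> simp [h]
    unfold pvInnerA
    by_cases h : pvOrF orig j (i + 1) = pvOrF orig j i
    · rw [hcond, if_pos (by simp [h])]
      refine ⟨hns, hans, ?_, fun _ _ => ⟨rfl, rfl⟩⟩
      intro j' hj'
      have hmono : pvOrF orig j' (i + 1) = pvOrF orig j' i :=
        pvOrF_mono orig j' j i (by omega) (by omega) h
      refine ⟨by rw [(hinv j' hj').1, hmono], ?_⟩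
      rw [(hinv j' hj').2, pvAnsV_succ orig j' i (by omega), if_neg (by simpa using hmono)]
    · rw [hcond, if_neg (by simp [h])]
      have hset1 : (ns.set j (PySem.Int.bor (ns.getD j 0) (orig.getD i 0))).length = orig.length := by
        simpa using hns
      have hset2 : (ans.set j ((i : Int) - (j : Int) + 1)).length = orig.length := by
        simpa using hans
      have hinv' : ∀ j', j' < j →
          (ns.set j (PySem.Int.bor (ns.getD j 0) (orig.getD i 0))).getD j' 0 = pvOrF orig j' i ∧
          (ans.set j ((i : Int) - (j : Int) + 1)).getD j' 0 = pvAnsV orig j' i := by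
        intro j' hj'
        rw [pvGetD_set_ne _ _ _ _ (by omega), pvGetD_set_ne _ _ _ _ (by omega)]
        exact hinv j' (by omega)
      obtain ⟨r1, r2, rlt, rge⟩ := ih _ _ (by omega) hset1 hset2 hinv'
      refine ⟨r1, r2, ?_, ?_⟩
      · intro j' hj'
        rcases Nat.lt_or_ge j' j with hlt | hge
        · exact rlt j' hlt
        · have hjj : j' = j := by omega
          subst hjj
          obtain ⟨e1, e2⟩ := rge j' (le_refl _)
          constructor
          · rw [e1, pvGetD_set_self _ _ _ (by omega), hnj, ← pvOrF_succ orig j' i (by omega)]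
          · rw [e2, pvGetD_set_self _ _ _ (by omega)]
            rw [pvAnsV_succ orig j' i (by omega), if_pos (by simpa using h)]
      · intro j' hj'
        obtain ⟨e1, e2⟩ := rge j' (by omega)
        rw [e1, e2, pvGetD_set_ne _ _ _ _ (by omega), pvGetD_set_ne _ _ _ _ (by omega)]
        exact ⟨rfl, rfl⟩

-- ---- A's outer loop invariant ----

theorem pvOuterA_spec (orig : List Int) :
    ∀ (m : Nat), m ≤ orig.length →
    ((List.range m).foldl (fun st i => pvInnerA (st.1.getD i 0) i i st)
        (orig, List.replicate orig.length 1)).1.length = orig.length ∧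
    ((List.range m).foldl (fun st i => pvInnerA (st.1.getD i 0) i i st)
        (orig, List.replicate orig.length 1)).2.length = orig.length ∧
    (∀ j, j < m →
      ((List.range m).foldl (fun st i => pvInnerA (st.1.getD i 0) i i st)
        (orig, List.replicate orig.length 1)).1.getD j 0 = pvOrF orig j m ∧
      ((List.range m).foldl (fun st i => pvInnerA (st.1.getD i 0) i i st)
        (orig, List.replicate orig.length 1)).2.getD j 0 = pvAnsV orig j m) ∧
    (∀ j, m ≤ j →
      ((List.range m).foldl (fun st i => pvInnerA (st.1.getD i 0) i i st)
        (orig, List.replicate orig.length 1)).1.getD j 0 = orig.getD j 0 ∧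
      ((List.range m).foldl (fun st i => pvInnerA (st.1.getD i 0) i i st)
        (orig, List.replicate orig.length 1)).2.getD j 0 = (List.replicate orig.length 1).getD j 0) := by
  intro m
  induction m with
  | zero =>
    intro _
    exact ⟨rfl, by simp, fun j hj => absurd hj (by omega), fun j _ => ⟨rfl, rfl⟩⟩
  | succ m ih =>
    intro hm
    obtain ⟨l1, l2, plt, pge⟩ := ih (by omega)
    set St := (List.range m).foldl (fun st i => pvInnerA (st.1.getD i 0) i i st)
      (orig, List.replicate orig.length 1) with hSt
    rw [List.range_succ, List.foldl_append, List.foldl_cons, List.foldl_nil]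
    have hx : St.1.getD m 0 = orig.getD m 0 := (pge m (le_refl m)).1
    have heta : pvInnerA (St.1.getD m 0) m m St = pvInnerA (orig.getD m 0) m m (St.1, St.2) := by
      rw [hx]
    rw [heta]
    obtain ⟨r1, r2, rlt, rge⟩ :=
      pvInnerA_spec orig m (by omega) m St.1 St.2 (le_refl m) l1 l2 (fun j hj => plt j hj)
    refine ⟨r1, r2, ?_, ?_⟩
    · intro j hj
      rcases Nat.lt_or_ge j m with hlt | hge
      · exact rlt j hlt
      · have hjm : j = m := by omega
        subst hjm
        obtain ⟨e1, e2⟩ := rge j (le_refl j)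
        refine ⟨?_, ?_⟩
        · rw [e1, hx, pvOrF_self]
        · rw [e2, (pge j (le_refl j)).2, pvGetD_replicate _ _ (by omega),
            pvAnsV_le orig j (j + 1) (by omega)]
    · intro j hj
      obtain ⟨e1, e2⟩ := rge j (by omega)
      rw [e1, e2]
      exact pge j (by omega)

-- ---- B's stack of distinct suffix ORs ----

-- weak chain: ors is a step description of k ↦ OR(nums[s..k]) from value vprev at kprev on, saturating at vend
def pvChainW (nums : List Int) (s : Nat) : Int → Nat → List (Int × Int) → Prop
  | vprev, _, [] => pvOrF nums s nums.length = vprev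
  | vprev, kprev, (v, k) :: t => ∃ kn : Nat, k = (kn : Int) ∧ kprev ≤ kn ∧ kn < nums.length ∧
      pvOrF nums s kn = vprev ∧ v = pvOrF nums s (kn + 1) ∧ pvChainW nums s v (kn + 1) t

-- strict segment: like pvChainW but with strictly growing values and an explicit end (vend, kend)
def pvSeg (nums : List Int) (s : Nat) : Int → Nat → List (Int × Int) → Int → Nat → Prop
  | vprev, kprev, [], vend, kend => vend = vprev ∧ kend = kprev
  | vprev, kprev, (v, k) :: t, vend, kend => ∃ kn : Nat, k = (kn : Int) ∧ kprev ≤ kn ∧ kn < nums.length ∧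
      pvOrF nums s kn = vprev ∧ v = pvOrF nums s (kn + 1) ∧ v ≠ vprev ∧ pvSeg nums s v (kn + 1) t vend kend

theorem pvSeg_to_chainW (nums : List Int) (s : Nat) :
    ∀ (l : List (Int × Int)) (vp : Int) (kp : Nat) (ve : Int) (ke : Nat),
    pvSeg nums s vp kp l ve ke → pvOrF nums s nums.length = ve → pvChainW nums s vp kp l := by
  intro l
  induction l with
  | nil =>
    intro vp kp ve ke hseg hsat
    obtain ⟨h1, h2⟩ := hseg
    exact h1 ▸ hsat
  | cons e t ih =>
    obtain ⟨v, k⟩ := e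
    intro vp kp ve ke hseg hsat
    obtain ⟨kn, ha, hb, hc, hd, he, _, hrest⟩ := hseg
    exact ⟨kn, ha, hb, hc, hd, he, ih v (kn + 1) ve ke hrest hsat⟩

theorem pvSeg_snoc (nums : List Int) (s : Nat) :
    ∀ (l : List (Int × Int)) (vp : Int) (kp : Nat) (ve : Int) (ke kn : Nat) (w : Int),
    pvSeg nums s vp kp l ve ke → ke ≤ kn → kn < nums.length →
    pvOrF nums s kn = ve → w = pvOrF nums s (kn + 1) → w ≠ ve →
    pvSeg nums s vp kp (l ++ [(w, (kn : Int))]) w (kn + 1) := by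
  intro l
  induction l with
  | nil =>
    intro vp kp ve ke kn w hseg hke hkn hor hw hne
    obtain ⟨h1, h2⟩ := hseg
    subst h1; subst h2
    exact ⟨kn, rfl, hke, hkn, hor, hw, by rw [hw] at hne ⊢; exact hne, rfl, rfl⟩
  | cons e t ih =>
    obtain ⟨v, k⟩ := e
    intro vp kp ve ke kn w hseg hke hkn hor hw hne
    obtain ⟨km, ha, hb, hc, hd, he, hf, hrest⟩ := hseg
    exact ⟨km, ha, hb, hc, hd, he, hf, ih v (km + 1) ve ke kn w hrest hke hkn hor hw hne⟩

theorem pvSeg_cases (nums : List Int) (s : Nat) :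
    ∀ (l : List (Int × Int)) (vp : Int) (kp : Nat) (ve : Int) (ke : Nat),
    pvSeg nums s vp kp l ve ke →
    (l = [] ∧ ve = vp ∧ ke = kp) ∨
    (∃ kn : Nat, ke = kn + 1 ∧ kp ≤ kn ∧ kn < nums.length ∧ ve = pvOrF nums s (kn + 1) ∧
      pvOrF nums s (kn + 1) ≠ pvOrF nums s kn ∧ l ≠ [] ∧ l.getLastD (0, 0) = (ve, (kn : Int))) := by
  intro l
  induction l with
  | nil =>
    intro vp kp ve ke hseg
    obtain ⟨h1, h2⟩ := hseg
    exact Or.inl ⟨rfl, h1, h2⟩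
  | cons e t ih =>
    obtain ⟨v, k⟩ := e
    intro vp kp ve ke hseg
    obtain ⟨kn, ha, hb, hc, hd, he, hf, hrest⟩ := hseg
    rcases ih v (kn + 1) ve ke hrest with ⟨ht, hv, hk⟩ | ⟨km, h1, h2, h3, h4, h5, hne, h6⟩
    · subst ht
      refine Or.inr ⟨kn, hk, hb, hc, ?_, ?_, by simp, ?_⟩
      · rw [hv, he]
      · rw [← he, hd]; exact hf
      · simp [List.getLastD, ha, hv, he]
    · refine Or.inr ⟨km, h1, by omega, h3, h4, h5, by simp, ?_⟩
      rw [List.getLastD_cons, List.getLastD_eq_getLast?]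
      rw [List.getLastD_eq_getLast?] at h6
      cases ht : t.getLast? with
      | none => exact absurd (List.getLast?_eq_none_iff.mp ht) hne
      | some e => rw [ht] at h6; simpa using h6

-- bor is monotone along pvOrF: a shorter range is absorbed by a longer one
theorem pvOrF_le (nums : List Int) (j a b : Nat) (h1 : j ≤ a) (h2 : a ≤ b) :
    PySem.Int.bor (pvOrF nums j a) (pvOrF nums j b) = pvOrF nums j b := by
  rw [pvOrF_split nums j a b h1 h2, ← pvBor_assoc, pvBor_self]

-- once the running OR has reached its final value, it never changes again
theorem pvOrF_sat (nums : List Int) (j i k : Nat) (hj : j ≤ i) (h1 : i ≤ k) (h2 : k ≤ nums.length)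
    (h : pvOrF nums j i = pvOrF nums j nums.length) : pvOrF nums j k = pvOrF nums j i := by
  have hab : PySem.Int.bor (pvOrF nums j i) (pvOrF nums j k) = pvOrF nums j k :=
    pvOrF_le nums j i k hj h1
  have hbc : PySem.Int.bor (pvOrF nums j k) (pvOrF nums j nums.length) = pvOrF nums j nums.length :=
    pvOrF_le nums j k nums.length (by omega) h2
  rw [← h] at hbc
  rw [← hab, PySem.Int.bor_comm, hbc]

theorem pvAnsV_sat (nums : List Int) (j i : Nat) (hj : j + 1 ≤ i) (h1 : i ≤ nums.length)
    (h : pvOrF nums j i = pvOrF nums j nums.length) :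
    pvAnsV nums j nums.length = pvAnsV nums j i := by
  have main : ∀ k, i ≤ k → k ≤ nums.length → pvAnsV nums j k = pvAnsV nums j i := by
    intro k hk
    induction k, hk using Nat.le_induction with
    | base => intro _; rfl
    | succ k hk ihk =>
      intro hkn
      have h1 : pvOrF nums j (k + 1) = pvOrF nums j k := by
        rw [pvOrF_sat nums j i (k + 1) (by omega) (by omega) hkn h,
          pvOrF_sat nums j i k (by omega) (by omega) (by omega) h]
      rw [pvAnsV_succ nums j k (by omega), if_neg (by simpa using h1)]
      exact ihk (by omega)
  exact main nums.length h1 (le_refl _)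

theorem pvGrow_spec (nums : List Int) (j : Nat) (hj : j < nums.length) :
    ∀ (old accT : List (Int × Int)) (vprevO vend : Int) (kprevO kend : Nat),
    pvChainW nums (j + 1) vprevO kprevO old →
    pvSeg nums j (pvOrF nums j (j + 1)) (j + 1) accT vend kend →
    ((pvOrF nums j (j + 1), (j : Int)) :: accT).getLastD (0, 0) = (vend, (kend : Int) - 1) →
    vend = PySem.Int.bor (nums.getD j 0) vprevO →
    kend ≤ kprevO → j + 1 ≤ kprevO →
    ∃ (accT' : List (Int × Int)) (vend' : Int) (kend' : Nat),
      pvGrow ((pvOrF nums j (j + 1), (j : Int)) :: accT) old = (pvOrF nums j (j + 1), (j : Int)) :: accT' ∧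
      pvSeg nums j (pvOrF nums j (j + 1)) (j + 1) accT' vend' kend' ∧
      ((pvOrF nums j (j + 1), (j : Int)) :: accT').getLastD (0, 0) = (vend', (kend' : Int) - 1) ∧
      vend' = pvOrF nums j nums.length := by
  intro old
  induction old with
  | nil =>
    intro accT vprevO vend kprevO kend hch hseg hlast hvend _ _
    refine ⟨accT, vend, kend, rfl, hseg, hlast, ?_⟩
    have hsat : pvOrF nums (j + 1) nums.length = vprevO := hch
    rw [hvend, pvOrF_split nums j (j + 1) nums.length (by omega) (by omega), ← hsat,
      pvOrF_self nums j]
  | cons e t ih =>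
    obtain ⟨v, k⟩ := e
    intro accT vprevO vend kprevO kend hch hseg hlast hvend hk1 hk2
    obtain ⟨kn, hkk, hb, hc, hd, he, hrest⟩ := hch
    subst hkk
    have hx : nums.getD j 0 = pvOrF nums j (j + 1) := (pvOrF_self nums j).symm
    have habs : PySem.Int.bor vprevO v = v := by
      rw [← hd, he]; exact pvOrF_le nums (j + 1) kn (kn + 1) (by omega) (by omega)
    have hw : PySem.Int.bor vend v = pvOrF nums j (kn + 1) := by
      rw [hvend, pvBor_assoc, habs, hx, he,
        ← pvOrF_split nums j (j + 1) (kn + 1) (by omega) (by omega)]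
    have hkn0 : pvOrF nums j kn = vend := by
      rw [pvOrF_split nums j (j + 1) kn (by omega) (by omega), ← hx, hd]
      exact hvend.symm
    rw [pvGrow, hlast]
    by_cases hcond : PySem.Int.bor vend v = vend
    · rw [if_neg (by simpa using hcond)]
      have hvend' : vend = PySem.Int.bor (nums.getD j 0) v := by
        rw [← hcond, hvend, pvBor_assoc, habs]
      exact ih accT v vend (kn + 1) kend hrest hseg hlast hvend' (by omega) (by omega)
    · rw [if_pos (by simpa using hcond)]
      have hseg2 : pvSeg nums j (pvOrF nums j (j + 1)) (j + 1)
          (accT ++ [(PySem.Int.bor vend v, (kn : Int))]) (PySem.Int.bor vend v) (kn + 1) :=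
        pvSeg_snoc nums j accT _ _ vend kend kn (PySem.Int.bor vend v) hseg (by omega) hc
          hkn0 hw (by simpa using hcond)
      have hlast2 : ((pvOrF nums j (j + 1), (j : Int)) :: (accT ++ [(PySem.Int.bor vend v, (kn : Int))])).getLastD (0, 0)
          = (PySem.Int.bor vend v, ((kn + 1 : Nat) : Int) - 1) := by
        rw [List.getLastD_cons, List.getLastD_concat]
        push_cast
        simp
      have hvend2 : PySem.Int.bor vend v = PySem.Int.bor (nums.getD j 0) v := by
        rw [hvend, pvBor_assoc, habs]
      have := ih (accT ++ [(PySem.Int.bor vend v, (kn : Int))]) v (PySem.Int.bor vend v)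
        (kn + 1) (kn + 1) hrest hseg2 hlast2 hvend2 (by omega) (by omega)
      simpa using this

theorem pvAns_from_seg (nums : List Int) (j : Nat) (hj : j < nums.length)
    (accT : List (Int × Int)) (vend : Int) (kend : Nat)
    (hseg : pvSeg nums j (pvOrF nums j (j + 1)) (j + 1) accT vend kend)
    (hsat : vend = pvOrF nums j nums.length) :
    ((kend : Int) - 1) - (j : Int) + 1 = pvAnsV nums j nums.length := by
  rcases pvSeg_cases nums j accT _ _ _ _ hseg with ⟨_, hv, hk⟩ | ⟨kn, h1, h2, h3, h4, h5, _, _⟩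
  · rw [pvAnsV_sat nums j (j + 1) (by omega) (by omega) (by rw [← hv, hsat]),
      pvAnsV_le nums j (j + 1) (by omega), hk]
    push_cast
    ring
  · rw [pvAnsV_sat nums j (kn + 1) (by omega) (by omega) (by rw [← h4, hsat]),
      pvAnsV_succ nums j kn (by omega), if_pos (by simpa using h5), h1]
    push_cast
    ring

theorem pvLoopB_spec (nums : List Int) :
    ∀ (jp1 : Nat) (ors : List (Int × Int)) (ans : List Int), jp1 ≤ nums.length →
    pvChainW nums jp1 0 jp1 ors →
    ans.length = nums.length →
    (∀ idx, jp1 ≤ idx → idx < nums.length → ans.getD idx 0 = pvAnsV nums idx nums.length) →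
    (pvLoopB nums jp1 (ors, ans)).2.length = nums.length ∧
    (∀ idx, idx < nums.length →
      (pvLoopB nums jp1 (ors, ans)).2.getD idx 0 = pvAnsV nums idx nums.length) := by
  intro jp1
  induction jp1 with
  | zero =>
    intro ors ans _ _ hlen hinv
    exact ⟨hlen, fun idx h => hinv idx (by omega) h⟩
  | succ j ih =>
    intro ors ans hle hch hlen hinv
    have hj : j < nums.length := by omega
    obtain ⟨accT', vend', kend', hgrow, hseg, hlast, hsat⟩ :=
      pvGrow_spec nums j hj ors [] 0 (pvOrF nums j (j + 1)) (j + 1) (j + 1) hch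
        ⟨rfl, rfl⟩ (by rw [List.getLastD_cons]; push_cast; simp [List.getLastD])
        (by rw [PySem.Int.bor_zero, pvOrF_self]) (le_refl _) (le_refl _)
    rw [pvLoopB, show nums.getD j 0 = pvOrF nums j (j + 1) from (pvOrF_self nums j).symm,
      hgrow, hlast]
    have hval : (vend', (kend' : Int) - 1).2 - (j : Int) + 1 = pvAnsV nums j nums.length :=
      pvAns_from_seg nums j hj accT' vend' kend' hseg hsat
    have hch' : pvChainW nums j 0 j ((pvOrF nums j (j + 1), (j : Int)) :: accT') :=
      ⟨j, rfl, le_refl _, hj, by unfold pvOrF; simp, rfl,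
        pvSeg_to_chainW nums j accT' _ _ _ _ hseg hsat.symm⟩
    refine ih _ _ (by omega) hch' (by rw [List.length_set]; exact hlen) ?_
    intro idx h1 h2
    rcases Nat.lt_or_ge j idx with hlt | hge
    · rw [pvGetD_set_ne _ _ _ _ (by omega)]
      exact hinv idx (by omega) h2
    · have : idx = j := by omega
      subst this
      rw [pvGetD_set_self _ _ _ (by omega), hval]

-- ===== VERDICT (by name: the statement is the Claim_ definition above) =====
theorem smallestSubarrays_spec : Claim_equal_smallestSubarrays := by
  intro nums _
  unfold Spec_smallestSubarrays smallestSubarrays smallestSubarrays_alt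
  obtain ⟨l1, l2, plt, _⟩ := pvOuterA_spec nums nums.length (le_refl _)
  obtain ⟨b2, bget⟩ := pvLoopB_spec nums nums.length [] (List.replicate nums.length 0)
    (le_refl _) (by unfold pvChainW pvOrF; simp) (by simp)
    (fun idx h1 h2 => absurd h1 (by omega))
  apply List.ext_getElem
  · rw [l2, b2]
  · intro j h1 h2
    have hj : j < nums.length := by rwa [l2] at h1
    rw [← List.getD_eq_getElem _ 0 h1, ← List.getD_eq_getElem _ 0 h2,
      (plt j hj).2, bget j hj]
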